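-- pv_equiv track=rewrite | github.com/asdlei99/infrastructure | pre_commit_checks/check_copyright/check_copyright.py | get_leading_comments
-- ===== SOURCE A (Python) =====
-- SUBSTRING_IS_NOT_FOUND = -1
--
-- def get_leading_comments(stream):
--     """
--     Returns the leading comments in C/C++ context from begin to the first not comment symbol
--
--     : param stream: string stream
--     """
--     comments = []
--     multiline_comment = False
--
--     for line in stream:
--         line = line.strip()
--
--         if not line:
--             continue
--
--         if not multiline_comment:
--             found_pos = line.find('/*')
--             if found_pos >= 0:
--                 if line.find('*/', found_pos) == SUBSTRING_IS_NOT_FOUND: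
--                     multiline_comment = True
--                 comments.append(line)
--                 continue
--
--             if line.find('//') >= 0:
--                 comments.append(line)
--                 continue
--
--             break
--
--         if multiline_comment:
--             if line.find('*/') >= 0:
--                 multiline_comment = False
--             comments.append(line)
--             continue
--     return comments
-- ===== SOURCE B (Python) =====
-- def get_leading_comments(stream):
--     """Leading C/C++ comment lines; nested-iterator decomposition instead of a boolean state flag."""
--     comments = []
--     it = iter(stream)
--     for line in it:
--         line = line.strip()
--         if not line:
--             continue
--         pos = line.find('/*')
--         if pos >= 0:
--             comments.append(line)
--             if line.find('*/', pos) == -1: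
--                 # unterminated: consume the same iterator until the closer
--                 for l2 in it:
--                     l2 = l2.strip()
--                     if not l2:
--                         continue
--                     comments.append(l2)
--                     if l2.find('*/') >= 0:
--                         break
--             continue
--         if line.find('//') >= 0:
--             comments.append(line)
--             continue
--         break
--     return comments
-- ===== Notes on version B (the rewrite author's own statement) =====
-- stated objective: alternative
-- what changed: Replaces A's single loop with a boolean multiline_comment state flag by a two-level traversal of one shared iterator: an inner loop consumes the lines of an unterminated /* comment until its closing */, so no mode flag is carried.
import Mathlib
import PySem

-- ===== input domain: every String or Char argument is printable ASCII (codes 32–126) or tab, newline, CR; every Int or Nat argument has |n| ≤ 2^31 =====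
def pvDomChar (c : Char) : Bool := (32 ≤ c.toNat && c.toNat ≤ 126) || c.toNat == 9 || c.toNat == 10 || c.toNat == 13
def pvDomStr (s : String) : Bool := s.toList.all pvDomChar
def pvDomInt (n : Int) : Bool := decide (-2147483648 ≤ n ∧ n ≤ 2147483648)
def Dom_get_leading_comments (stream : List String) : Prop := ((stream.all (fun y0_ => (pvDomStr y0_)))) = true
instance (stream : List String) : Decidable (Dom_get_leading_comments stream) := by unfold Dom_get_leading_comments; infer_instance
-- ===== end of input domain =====

-- B replaces A's boolean `multiline_comment` state flag by a nested inner traversal of the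
-- same stream that consumes lines until the closing '*/'; same return value (objective: alternative decomposition).

-- ===== PORT A =====
-- literal port of A's single loop with the boolean flag and the accumulating list
def get_leading_comments_aux (multiline_comment : Bool) (stream comments : List String) : List String :=
  match stream with
  | [] => comments
  | l :: ls =>
    let line := PySem.Str.strip l
    if line = "" then get_leading_comments_aux multiline_comment ls comments
    else if multiline_comment = false then
      let found_pos := PySem.Str.find line "/*"
      if found_pos ≥ 0 then
        let mc' := if PySem.Str.findFrom line "*/" found_pos none = -1 then true else multiline_comment
        get_leading_comments_aux mc' ls (comments ++ [line])
      else if PySem.Str.find line "//" ≥ 0 then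
        get_leading_comments_aux multiline_comment ls (comments ++ [line])
      else comments
    else
      let mc' := if PySem.Str.find line "*/" ≥ 0 then false else multiline_comment
      get_leading_comments_aux mc' ls (comments ++ [line])

def get_leading_comments (stream : List String) : List String :=
  get_leading_comments_aux false stream []

-- ===== PORT B =====
-- inner loop: consume lines of an unterminated multiline comment; returns (collected, remaining stream)
def glcInner (stream : List String) : List String × List String :=
  match stream with
  | [] => ([], [])
  | l :: ls =>
    let l2 := PySem.Str.strip l
    if l2 = "" then glcInner ls
    else if PySem.Str.find l2 "*/" ≥ 0 then ([l2], ls)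
    else
      let r := glcInner ls
      (l2 :: r.1, r.2)

theorem glcInner_rest_le (stream : List String) : (glcInner stream).2.length ≤ stream.length := by
  induction stream with
  | nil => simp [glcInner]
  | cons l ls ih =>
    simp only [glcInner]
    split_ifs <;> simp <;> omega

-- outer loop over the iterator; on an unterminated '/*' it hands the iterator to glcInner
def get_leading_comments_alt (stream : List String) : List String :=
  match stream with
  | [] => []
  | l :: ls =>
    let line := PySem.Str.strip l
    if line = "" then get_leading_comments_alt ls
    else
      let pos := PySem.Str.find line "/*"
      if pos ≥ 0 then
        if PySem.Str.findFrom line "*/" pos none = -1 then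
          let r := glcInner ls
          line :: (r.1 ++ get_leading_comments_alt r.2)
        else line :: get_leading_comments_alt ls
      else if PySem.Str.find line "//" ≥ 0 then line :: get_leading_comments_alt ls
      else []
termination_by stream.length
decreasing_by
  all_goals simp only [List.length_cons]
  all_goals first
    | omega
    | (have := glcInner_rest_le ls; omega)

-- ===== PRECONDITION & SPEC =====
def Spec_get_leading_comments (stream : List String) (out : List String) : Prop := out = get_leading_comments_alt stream
instance (stream : List String) (out : List String) : Decidable (Spec_get_leading_comments stream out) := by unfold Spec_get_leading_comments; infer_instance

-- ===== CLAIM (what is proved, stated in full; the proofs are below) =====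
def Claim_equal_get_leading_comments : Prop := ∀ (stream : List String), Dom_get_leading_comments stream → Spec_get_leading_comments stream (get_leading_comments stream)

-- ===== LEMMAS AND PROOFS =====

-- A's loop with the flag set equals the inner collection followed by the flag-off loop on the remainder
theorem aux_true_eq (stream : List String) : ∀ acc,
    get_leading_comments_aux true stream acc
      = get_leading_comments_aux false (glcInner stream).2 (acc ++ (glcInner stream).1) := by
  induction stream with
  | nil => intro acc; simp [glcInner, get_leading_comments_aux]
  | cons l ls ih =>
    intro acc
    simp only [get_leading_comments_aux, glcInner]
    by_cases h0 : PySem.Str.strip l = ""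
    · simp [h0, ih]
    · by_cases h1 : 0 ≤ PySem.Chars.find (PySem.Chars.strip l.toList) ['*', '/']
      · simp [h0, h1]
      · simp [h0, h1, ih, List.append_assoc]

theorem aux_false_eq_bounded : ∀ (n : Nat) (stream : List String), stream.length ≤ n → ∀ acc,
    get_leading_comments_aux false stream acc = acc ++ get_leading_comments_alt stream := by
  intro n
  induction n with
  | zero =>
    intro stream hlen acc
    have : stream = [] := List.length_eq_zero_iff.mp (Nat.le_zero.mp hlen)
    subst this
    simp [get_leading_comments_aux, get_leading_comments_alt]
  | succ n ih =>
    intro stream hlen acc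
    match stream with
    | [] => simp [get_leading_comments_aux, get_leading_comments_alt]
    | l :: ls =>
      simp only [List.length_cons] at hlen
      simp only [get_leading_comments_aux, get_leading_comments_alt]
      by_cases h0 : PySem.Str.strip l = ""
      · simp [h0, ih ls (by omega)]
      · by_cases h1 : PySem.Chars.find (PySem.Chars.strip l.toList) "/*".toList ≥ 0
        · by_cases h2 : PySem.Chars.findFrom (PySem.Chars.strip l.toList) "*/".toList
              (PySem.Chars.find (PySem.Chars.strip l.toList) "/*".toList) none = -1
          · have hrest := glcInner_rest_le ls
            rw [if_neg h0, if_neg h0]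
            simp only [ite_true]
            simp only [PySem.Str.find_eq, PySem.Str.findFrom_eq, PySem.Str.toList_strip]
            rw [if_pos h1, if_pos h1, if_pos h2, if_pos h2]
            rw [aux_true_eq, ih (glcInner ls).2 (by omega)]
            simp [List.append_assoc]
          · have h1' : 0 ≤ PySem.Chars.find (PySem.Chars.strip l.toList) ['/', '*'] := by
              simpa using h1
            have h2' : ¬ PySem.Chars.findFrom (PySem.Chars.strip l.toList) ['*', '/']
                (PySem.Chars.find (PySem.Chars.strip l.toList) ['/', '*']) none = -1 := by
              simpa using h2
            simp [h0, h1', h2', ih ls (by omega), List.append_assoc]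
        · by_cases h3 : PySem.Chars.find (PySem.Chars.strip l.toList) "//".toList ≥ 0
          · have h1' : ¬ 0 ≤ PySem.Chars.find (PySem.Chars.strip l.toList) ['/', '*'] := by
              simpa using h1
            have h3' : 0 ≤ PySem.Chars.find (PySem.Chars.strip l.toList) ['/', '/'] := by
              simpa using h3
            simp [h0, h1', h3', ih ls (by omega), List.append_assoc]
          · have h1' : ¬ 0 ≤ PySem.Chars.find (PySem.Chars.strip l.toList) ['/', '*'] := by
              simpa using h1
            have h3' : ¬ 0 ≤ PySem.Chars.find (PySem.Chars.strip l.toList) ['/', '/'] := by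
              simpa using h3
            simp [h0, h1', h3']

-- ===== VERDICT (by name: the statement is the Claim_ definition above) =====
theorem get_leading_comments_spec : Claim_equal_get_leading_comments := by
  intro stream _
  unfold Spec_get_leading_comments get_leading_comments
  simpa using aux_false_eq_bounded stream.length stream le_rfl []
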